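-- pv_equiv track=rewrite | github.com/edwardgeorge/pyrepl-livesearch | pyrepl_livesearch/helpers.py | iterate_words
-- ===== SOURCE A (Python) =====
-- def iterate_words(text):
--     i = 0
--     while True:
--         offset = text.find(' ', i)
--         if offset > -1:
--             word = text[i: offset]
--         else:
--             word = text[i:]
--         if word:
--             yield i, word
--         if offset == -1:
--             break
--         i = offset + 1
-- ===== SOURCE B (Python) =====
-- import re
--
-- def iterate_words(text):
--     # Regex engine finds each maximal run of non-space characters (only ' '
--     # separates, matching A's text.find(' ', i) loop) and reports its offset.
--     for m in re.finditer(r'[^ ]+', text):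
--         yield m.start(), m.group()
-- ===== Notes on version B (the rewrite author's own statement) =====
-- stated objective: idiomatic
-- what changed: A loops calling str.find for the next space separator and slices each word out between indices; B instead has re.finditer scan the string once for maximal runs of non-separator characters, emitting each run with its match start offset.
import Mathlib
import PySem

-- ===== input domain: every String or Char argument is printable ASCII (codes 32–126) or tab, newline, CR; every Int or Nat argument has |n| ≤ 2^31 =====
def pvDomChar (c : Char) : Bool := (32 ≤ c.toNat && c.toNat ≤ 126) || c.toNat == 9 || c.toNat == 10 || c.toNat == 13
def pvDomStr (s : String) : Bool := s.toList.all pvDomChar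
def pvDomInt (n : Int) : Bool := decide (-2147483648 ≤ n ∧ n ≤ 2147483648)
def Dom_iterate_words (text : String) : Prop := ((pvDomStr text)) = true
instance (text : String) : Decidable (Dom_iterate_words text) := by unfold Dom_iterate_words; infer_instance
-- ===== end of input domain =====

-- B replaces A's find/slice index loop by a regex-style skip-separators/take-run scan
-- (Python B uses re.finditer on non-space runs); objective: more idiomatic, same result proved equal.


-- ===== PORT A =====
-- Needed by the port itself (domain/termination of the index loop):
-- when text.find(' ', i) succeeds it returns an index in [i, len).
theorem pvFindFromSpaceBounds (cs : List Char) (i : Nat) (h : i ≤ cs.length)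
    (hne : PySem.Chars.findFrom cs [' '] (i : Int) none > -1) :
    i ≤ (PySem.Chars.findFrom cs [' '] (i : Int) none).toNat ∧
      (PySem.Chars.findFrom cs [' '] (i : Int) none).toNat < cs.length := by
  obtain ⟨hle, hpre, -⟩ :=
    PySem.Chars.findFrom_natCast_spec cs [' '] i h (by omega)
  obtain ⟨t, ht⟩ := hpre
  have hlen := congrArg List.length ht
  simp [List.length_drop] at hlen
  omega

-- literal port of A's while-loop: i is the scan index, offset = text.find(' ', i)
def pvAGo (cs : List Char) (i : Nat) (h : i ≤ cs.length) : List (Int × String) :=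
  if hoff : PySem.Chars.findFrom cs [' '] (i : Int) none > -1 then
    -- offset > -1 : word = text[i:offset]; yield if nonempty; i = offset + 1
    (if PySem.Chars.slice cs (some (i : Int))
          (some (PySem.Chars.findFrom cs [' '] (i : Int) none)) ≠ [] then
        [((i : Int), String.ofList (PySem.Chars.slice cs (some (i : Int))
            (some (PySem.Chars.findFrom cs [' '] (i : Int) none))))]
      else []) ++
      pvAGo cs ((PySem.Chars.findFrom cs [' '] (i : Int) none).toNat + 1)
        (by have := pvFindFromSpaceBounds cs i h hoff; omega)
  else
    -- offset == -1 : word = text[i:]; yield if nonempty; break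
    if PySem.Chars.slice cs (some (i : Int)) none ≠ [] then
      [((i : Int), String.ofList (PySem.Chars.slice cs (some (i : Int)) none))]
    else []
termination_by cs.length - i
decreasing_by have := pvFindFromSpaceBounds cs i h hoff; omega

def iterate_words (text : String) : List (Int × String) :=
  pvAGo text.toList 0 (Nat.zero_le _)

-- ===== PORT B =====
-- hand port of re.finditer(r'[^ ]+', text): skip separators, emit each maximal
-- non-space run with its start offset (exact for this pattern: the matches are
-- the maximal runs of non-space characters, scanned left to right)
def pvBGo : List Char → Nat → List (Int × String)
  | [], _ => []
  | c :: rest, pos =>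
    if hc : c = ' ' then pvBGo rest (pos + 1)
    else
      ((pos : Int), String.ofList ((c :: rest).takeWhile (fun x => x != ' '))) ::
        pvBGo ((c :: rest).dropWhile (fun x => x != ' '))
          (pos + ((c :: rest).takeWhile (fun x => x != ' ')).length)
termination_by cs _ => cs.length
decreasing_by
  · simp
  · simp only [List.dropWhile_cons, show (c != ' ') = true by simpa using hc, if_true]
    have := List.length_dropWhile_le (p := fun x => x != ' ') (l := rest)
    simp only [List.length_cons]
    omega

def iterate_words_alt (text : String) : List (Int × String) :=
  pvBGo text.toList 0

-- ===== PRECONDITION & SPEC =====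
def Spec_iterate_words (text : String) (out : List (Int × String)) : Prop := out = iterate_words_alt text
instance (text : String) (out : List (Int × String)) : Decidable (Spec_iterate_words text out) := by unfold Spec_iterate_words; infer_instance

-- ===== CLAIM (what is proved, stated in full; the proofs are below) =====
def Claim_equal_iterate_words : Prop := ∀ (text : String), Dom_iterate_words text → Spec_iterate_words text (iterate_words text)

-- ===== LEMMAS AND PROOFS =====

-- takeWhile stops at the first element that fails the predicate
theorem pvTakeWhileStop {p : Char → Bool} :
    ∀ (l : List Char) (h : (l.takeWhile p).length < l.length),
      p (l[(l.takeWhile p).length]'h) = false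
  | a :: l, h => by
    by_cases hp : p a
    · simp only [List.takeWhile_cons, hp, if_true, List.length_cons,
        List.getElem_cons_succ]
      exact pvTakeWhileStop l (by simpa [List.takeWhile_cons, hp] using h)
    · simp [hp]

theorem pvDropWhileEqDrop (p : Char → Bool) (l : List Char) :
    l.dropWhile p = l.drop (l.takeWhile p).length := by
  induction l with
  | nil => simp
  | cons a l ih =>
    by_cases hp : p a <;> simp [hp, ih]

theorem pvTakeWhileEqTake (p : Char → Bool) (l : List Char) :
    l.takeWhile p = l.take (l.takeWhile p).length :=
  List.prefix_iff_eq_take.mp (List.takeWhile_prefix p)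

-- s.find(' ') is -1 exactly when there is no space
theorem pvFindNoSpace (l : List Char) (hmem : ' ' ∉ l) :
    PySem.Chars.find l [' '] = -1 := by
  rw [PySem.Chars.find_eq_neg_one_iff]
  intro hin
  exact hmem ((List.singleton_infix_iff ' ' l).mp hin)

-- s.find(' ') is the length of the leading non-space run when a space exists
theorem pvFindSpace (l : List Char) (hmem : ' ' ∈ l) :
    PySem.Chars.find l [' '] = ((l.takeWhile (fun x => x != ' ')).length : Int) := by
  have hin : [' '] <:+: l := (List.singleton_infix_iff ' ' l).mpr hmem
  have h0 : 0 ≤ PySem.Chars.find l [' '] := (PySem.Chars.find_nonneg_iff _ _).mpr hin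
  obtain ⟨hpre, hmin⟩ := PySem.Chars.find_spec (s := l) (sub := [' ']) h0
  obtain ⟨t, ht⟩ := hpre
  have hd : l.drop (PySem.Chars.find l [' ']).toNat = ' ' :: t := by
    simpa using ht.symm
  have hflen : (PySem.Chars.find l [' ']).toNat < l.length := by
    have hlen := congrArg List.length hd
    simp [List.length_drop] at hlen
    omega
  have hnosp : (' ' : Char) ∉ l.takeWhile (fun x => x != ' ') := by
    intro hx
    simpa using List.mem_takeWhile_imp hx
  have h1 : ¬ ((PySem.Chars.find l [' ']).toNat < (l.takeWhile (fun x => x != ' ')).length) := by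
    intro hlt
    apply hnosp
    rw [pvTakeWhileEqTake]
    rw [show (l.takeWhile (fun x => x != ' ')).length =
      (PySem.Chars.find l [' ']).toNat +
        ((l.takeWhile (fun x => x != ' ')).length - (PySem.Chars.find l [' ']).toNat) by omega]
    rw [List.take_add, hd]
    rw [show (l.takeWhile (fun x => x != ' ')).length - (PySem.Chars.find l [' ']).toNat =
      ((l.takeWhile (fun x => x != ' ')).length - (PySem.Chars.find l [' ']).toNat - 1) + 1 by omega]
    rw [List.take_succ_cons]
    simp
  have h2 : ¬ ((l.takeWhile (fun x => x != ' ')).length < (PySem.Chars.find l [' ']).toNat) := by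
    intro hlt
    have hkl : (l.takeWhile (fun x => x != ' ')).length < l.length := by omega
    have hstop := pvTakeWhileStop (p := fun x => x != ' ') l hkl
    have hsp : l[(l.takeWhile (fun x => x != ' ')).length]'hkl = ' ' := by
      simpa using hstop
    refine hmin _ hlt ?_
    rw [List.drop_eq_getElem_cons hkl, hsp]
    exact ⟨l.drop ((l.takeWhile (fun x => x != ' ')).length + 1), rfl⟩
  omega

-- if no element of l is a space, the whole of l is one run
theorem pvTakeWhileAll (l : List Char) (hmem : ' ' ∉ l) :
    l.takeWhile (fun x => x != ' ') = l := by
  rw [List.takeWhile_eq_self_iff]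
  intro x hx
  simp only [bne_iff_ne, ne_eq]
  intro hxe
  exact hmem (hxe ▸ hx)

-- the two loops agree: A at absolute index i equals B on the suffix from i
theorem pvMain (n : Nat) : ∀ (cs : List Char) (i : Nat) (h : i ≤ cs.length),
    cs.length - i ≤ n → pvAGo cs i h = pvBGo (cs.drop i) i := by
  induction n with
  | zero =>
    intro cs i h hn
    have hi : cs.drop i = [] := by
      have : i = cs.length := by omega
      simp [this]
    rw [pvAGo]
    have hfind : PySem.Chars.findFrom cs [' '] (i : Int) none = -1 := by
      rw [PySem.Chars.findFrom_natCast cs [' '] i h, hi,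
        pvFindNoSpace [] (by simp)]
      simp
    simp only [hfind]
    rw [dif_neg (by norm_num)]
    simp [PySem.List.slice_from_natCast, hi, pvBGo]
  | succ n ih =>
    intro cs i h hn
    rw [pvAGo]
    by_cases hmem : ' ' ∈ cs.drop i
    · have hne : cs.drop i ≠ [] := by intro he; rw [he] at hmem; simp at hmem
      have hil : i < cs.length := by
        by_contra hc
        exact hne (by simp [List.drop_eq_nil_iff]; omega)
      have hfind : PySem.Chars.findFrom cs [' '] (i : Int) none =
          (i : Int) + ((cs.drop i).takeWhile (fun x => x != ' ')).length := by
        rw [PySem.Chars.findFrom_natCast cs [' '] i h, pvFindSpace _ hmem]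
        simp
      have hklt : ((cs.drop i).takeWhile (fun x => x != ' ')).length < (cs.drop i).length := by
        rcases Nat.lt_or_ge ((cs.drop i).takeWhile (fun x => x != ' ')).length
            (cs.drop i).length with hlt | hge
        · exact hlt
        · exfalso
          have hall : (cs.drop i).takeWhile (fun x => x != ' ') = cs.drop i :=
            (List.takeWhile_prefix (fun x => x != ' ')).eq_of_length_le hge
          have := List.mem_takeWhile_imp (hall ▸ hmem)
          simp at this
      set k := ((cs.drop i).takeWhile (fun x => x != ' ')).length with hk
      have hikl : i + k < cs.length := by
        have := List.length_drop (i := i) (l := cs)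
        omega
      have htn : (((i : Int) + (k : Int))).toNat = i + k := by omega
      have hoff : ((i : Int) + (k : Int)) > -1 := by omega
      simp only [hfind, htn]
      rw [dif_pos hoff]
      have hword : PySem.Chars.slice cs (some (i : Int)) (some ((i : Int) + (k : Int))) =
          (cs.drop i).take k := by
        rw [show ((i : Int) + (k : Int)) = ((i + k : Nat) : Int) by push_cast; ring]
        rw [PySem.Chars.slice_eq_listSlice, PySem.List.slice_natCast,
          Nat.add_sub_cancel_left]
      have htake : (cs.drop i).take k = (cs.drop i).takeWhile (fun x => x != ' ') := by
        rw [pvTakeWhileEqTake]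
      -- the character at the end of the run is the space A jumps over
      have hksp : cs.drop (i + k) = ' ' :: cs.drop (i + k + 1) := by
        have hstop := pvTakeWhileStop (p := fun x => x != ' ') (cs.drop i) hklt
        have hsp : (cs.drop i)[k]'hklt = ' ' := by simpa [← hk] using hstop
        rw [← List.drop_drop, List.drop_eq_getElem_cons hklt, hsp, List.drop_drop]
        have harith : i + (k + 1) = i + k + 1 := by omega
        rw [harith]
      have hrec : ∀ (hp : i + k + 1 ≤ cs.length),
          pvAGo cs (i + k + 1) hp = pvBGo (cs.drop (i + k + 1)) (i + k + 1) :=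
        fun hp => ih cs (i + k + 1) hp (by omega)
      rw [hrec, hword, htake]
      rcases he : cs.drop i with _ | ⟨c, t⟩
      · exact absurd he hne
      by_cases hc : c = ' '
      · -- leading space: empty word, advance by one
        have hk0 : k = 0 := by
          rw [hk, he, List.takeWhile_cons, hc]
          simp
        have ht : t = cs.drop (i + 1) := by
          have h1 := congrArg (List.drop 1) he
          rw [List.drop_drop] at h1
          simpa using h1.symm
        subst hc
        rw [pvBGo, dif_pos rfl, List.takeWhile_cons]
        simp only [bne_self_eq_false, Bool.false_eq_true, if_false, ne_eq,
          not_true_eq_false, List.nil_append, hk0, Nat.add_zero]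
        rw [ht]
      · -- non-space head: one word of length k ≥ 1, then the space, then recurse
        have hk1 : 0 < k := by
          rw [hk, he, List.takeWhile_cons]
          simp [hc]
        have hwne : (c :: t).takeWhile (fun x => x != ' ') ≠ [] := by
          rw [List.takeWhile_cons, show (c != ' ') = true by simpa using hc]
          simp
        rw [pvBGo, dif_neg hc]
        rw [if_pos (by rw [← he] at hwne ⊢; exact hwne)]
        rw [← he, pvDropWhileEqDrop, ← hk, List.drop_drop, hksp]
        rw [pvBGo, dif_pos rfl]
        simp
    · -- no space from i on: the tail is the last word (possibly empty)
      have hfind : PySem.Chars.findFrom cs [' '] (i : Int) none = -1 := by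
        rw [PySem.Chars.findFrom_natCast cs [' '] i h, pvFindNoSpace _ hmem]
        simp
      simp only [hfind]
      rw [dif_neg (by norm_num)]
      rw [PySem.Chars.slice_eq_listSlice, PySem.List.slice_from_natCast]
      rcases he : cs.drop i with _ | ⟨c, t⟩
      · simp [pvBGo]
      · have hc : ¬ c = ' ' := by
          intro hceq
          exact hmem (he ▸ (hceq ▸ List.mem_cons_self))
        rw [pvBGo, dif_neg hc]
        have hall : (c :: t).takeWhile (fun x => x != ' ') = c :: t :=
          pvTakeWhileAll _ (he ▸ hmem)
        have hdw : (c :: t).dropWhile (fun x => x != ' ') = [] := by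
          rw [pvDropWhileEqDrop, hall]
          simp
        rw [hall, hdw, pvBGo]
        simp

-- ===== VERDICT (by name: the statement is the Claim_ definition above) =====
theorem iterate_words_spec : Claim_equal_iterate_words := by
  intro text _
  unfold Spec_iterate_words iterate_words iterate_words_alt
  have := pvMain text.toList.length text.toList 0 (Nat.zero_le _) (by omega)
  simpa using this
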